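-- pv_equiv track=rewrite | github.com/xaneeeey/Personal-AI-ChatBot | discordparser.py | combine_consecutive
-- ===== SOURCE A (Python) =====
-- def combine_consecutive(messages: list[dict]) -> list[dict]:
--     if not messages:
--         return []
--     combined = [messages[0].copy()]
--     for msg in messages[1:]:
--         if msg["_username"] == combined[-1]["_username"]:
--             combined[-1]["_text"] += " " + msg["_text"]
--         else:
--             combined.append(msg.copy())
--     return combined
-- ===== SOURCE B (Python) =====
-- def combine_consecutive(messages: list[dict]) -> list[dict]:
--     result = []
--     n = len(messages)
--     i = 0
--     while i < n:
--         j = i + 1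
--         while j < n and messages[j]["_username"] == messages[i]["_username"]:
--             j += 1
--         d = messages[i].copy()
--         if j - i > 1:
--             d["_text"] = " ".join(m["_text"] for m in messages[i:j])
--         result.append(d)
--         i = j
--     return result
-- ===== Notes on version B (the rewrite author's own statement) =====
-- stated objective: alternative
-- what changed: Replaces A's compare-to-last accumulator loop (mutating the last element of the output list) with a run-splitting pass: split off each maximal consecutive same-username run, then emit the run head's copy with '_text' set to the ' '-joined texts of the run.
import Mathlib
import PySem

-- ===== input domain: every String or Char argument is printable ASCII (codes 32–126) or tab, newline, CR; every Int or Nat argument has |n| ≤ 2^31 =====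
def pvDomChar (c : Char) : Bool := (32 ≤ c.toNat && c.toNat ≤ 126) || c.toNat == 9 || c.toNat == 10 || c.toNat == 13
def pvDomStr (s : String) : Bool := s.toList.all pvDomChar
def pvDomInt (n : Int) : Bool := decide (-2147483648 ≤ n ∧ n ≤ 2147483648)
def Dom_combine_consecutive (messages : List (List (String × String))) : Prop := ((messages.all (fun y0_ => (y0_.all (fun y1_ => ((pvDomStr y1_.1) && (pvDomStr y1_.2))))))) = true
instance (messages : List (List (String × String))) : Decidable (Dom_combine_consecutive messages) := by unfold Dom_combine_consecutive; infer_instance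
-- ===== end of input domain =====

-- B replaces A's compare-to-last accumulator loop by a run-splitting recursion
-- (split off each maximal same-username run, emit its head with the joined text): objective 'alternative'.


-- ===== PORT A =====
-- shared dict primitives (a message is a Python dict, here its association list):
-- msg["_username"] as an Option (none = key absent), msg["_text"] with default "" (Pre_ guarantees presence
-- wherever the Python reads it), and d["_text"] = t (overwrite keeps the key's position).
def pvGetU (m : List (String × String)) : Option String := (PySem.Dict.mk m).get? "_username"
def pvGetT (m : List (String × String)) : String := (PySem.Dict.mk m).getD "_text" ""
def pvSetT (m : List (String × String)) (t : String) : List (String × String) :=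
  ((PySem.Dict.mk m).insert "_text" t).items

-- literal transliteration of A: combined = [messages[0].copy()]; for msg in messages[1:]:
--   merge into combined[-1] when usernames match, else append msg.copy().
def combine_consecutive (messages : List (List (String × String))) : List (List (String × String)) :=
  match messages with
  | [] => []
  | m0 :: rest =>
    rest.foldl (fun combined msg =>
      match combined.getLast? with
      | none => combined   -- unreachable: combined starts nonempty and never shrinks
      | some last =>
        if pvGetU msg = pvGetU last then
          combined.dropLast ++ [pvSetT last (pvGetT last ++ " " ++ pvGetT msg)]
        else
          combined ++ [msg]) [m0]

-- ===== PORT B =====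
-- Source B's inner while: split rest into the maximal prefix whose "_username" equals u, and the remainder.
def pvRunSplit (u : Option String) : List (List (String × String)) → List (List (String × String)) × List (List (String × String))
  | [] => ([], [])
  | m :: rest =>
    if pvGetU m = u then
      let p := pvRunSplit u rest
      (m :: p.1, p.2)
    else ([], m :: rest)

theorem pvRunSplit_snd_length_le (u : Option String) (l : List (List (String × String))) :
    (pvRunSplit u l).2.length ≤ l.length := by
  induction l with
  | nil => simp [pvRunSplit]
  | cons m rest ih =>
    by_cases h : pvGetU m = u
    · simp [pvRunSplit, h]; omega
    · simp [pvRunSplit, h]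

-- transliteration of Source B's outer while: take the run headed by the current message,
-- copy the head, reassign "_text" to the " "-joined texts when the run has ≥ 2 messages.
def combine_consecutive_alt (messages : List (List (String × String))) : List (List (String × String)) :=
  match messages with
  | [] => []
  | m :: rest =>
    let p := pvRunSplit (pvGetU m) rest
    let d := if p.1.isEmpty then m
             else pvSetT m (PySem.Str.join " " ((m :: p.1).map pvGetT))
    d :: combine_consecutive_alt p.2
termination_by messages.length
decreasing_by
  have := pvRunSplit_snd_length_le (pvGetU m) rest
  simp at *; omega

-- ===== PRECONDITION & SPEC =====
-- Pre_ is exactly where the Python A returns (no KeyError): with ≥ 2 messages every message needs the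
-- "_username" key, and any two adjacent messages with equal usernames (a merge step) both need "_text".
def Pre_combine_consecutive (messages : List (List (String × String))) : Prop :=
  (messages.length ≤ 1 ∨ ∀ m ∈ messages, (PySem.Dict.mk m).contains "_username") ∧
  List.IsChain (fun a b => pvGetU a = pvGetU b →
    (PySem.Dict.mk a).contains "_text" ∧ (PySem.Dict.mk b).contains "_text") messages
instance (messages : List (List (String × String))) : Decidable (Pre_combine_consecutive messages) := by
  unfold Pre_combine_consecutive; infer_instance
def pvWitness_combine_consecutive : (List (List (String × String))) :=
  [[("_username", "a"), ("_text", "hi")], [("_username", "a"), ("_text", "there")],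
   [("_username", "b"), ("_text", "yo")]]
def Spec_combine_consecutive (messages : List (List (String × String))) (out : List (List (String × String))) : Prop := out = combine_consecutive_alt messages
instance (messages : List (List (String × String))) (out : List (List (String × String))) : Decidable (Spec_combine_consecutive messages out) := by unfold Spec_combine_consecutive; infer_instance

-- ===== CLAIM (what is proved, stated in full; the proofs are below) =====
def Claim_equal_combine_consecutive : Prop := ∀ (messages : List (List (String × String))), Dom_combine_consecutive messages → Pre_combine_consecutive messages → Spec_combine_consecutive messages (combine_consecutive messages)

-- ===== LEMMAS AND PROOFS =====

-- proof-side reformulation of A's loop: the untouched prefix is factored out and the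
-- current last element is carried explicitly.
def pvMergeFrom (cur : List (String × String)) : List (List (String × String)) → List (List (String × String))
  | [] => [cur]
  | m :: rest =>
    if pvGetU m = pvGetU cur then
      pvMergeFrom (pvSetT cur (pvGetT cur ++ " " ++ pvGetT m)) rest
    else
      cur :: pvMergeFrom m rest

theorem pvFoldl_eq_mergeFrom (rest : List (List (String × String)))
    (pre : List (List (String × String))) (cur : List (String × String)) :
    rest.foldl (fun combined msg =>
      match combined.getLast? with
      | none => combined
      | some last =>
        if pvGetU msg = pvGetU last then
          combined.dropLast ++ [pvSetT last (pvGetT last ++ " " ++ pvGetT msg)]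
        else
          combined ++ [msg]) (pre ++ [cur]) = pre ++ pvMergeFrom cur rest := by
  induction rest generalizing pre cur with
  | nil => simp [pvMergeFrom]
  | cons m rest ih =>
    simp only [List.foldl_cons, List.getLast?_concat, List.dropLast_concat]
    by_cases h : pvGetU m = pvGetU cur
    · rw [if_pos h, pvMergeFrom, if_pos h]
      exact ih pre _
    · rw [if_neg h, pvMergeFrom, if_neg h]
      simpa using ih (pre ++ [cur]) m

theorem pvJoin_cons_cons (a b : String) (l : List String) :
    PySem.Str.join " " (a :: b :: l) = a ++ " " ++ PySem.Str.join " " (b :: l) := by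
  apply String.toList_inj.mp
  simp [PySem.Str.join, PySem.Chars.join_cons_cons, String.toList_append, String.toList_ofList]

theorem pvJoin_singleton (a : String) : PySem.Str.join " " [a] = a := by
  apply String.toList_inj.mp
  simp [PySem.Str.join, PySem.Chars.join_singleton]

theorem pvGetU_setT (m : List (String × String)) (t : String) : pvGetU (pvSetT m t) = pvGetU m := by
  simp [pvGetU, pvSetT]
  exact PySem.Dict.get?_insert_of_ne _ t (by decide)

theorem pvGetT_setT (m : List (String × String)) (t : String) : pvGetT (pvSetT m t) = t :=
  PySem.Dict.getD_insert_self (PySem.Dict.mk m) "_text" t ""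

theorem pvSetT_setT (m : List (String × String)) (s t : String) : pvSetT (pvSetT m s) t = pvSetT m t := by
  simp [pvSetT]
  rw [PySem.Dict.insert_insert_self]

theorem pvMergeFrom_eq_alt_aux (n : Nat) : ∀ (rest : List (List (String × String))) (cur : List (String × String)), rest.length ≤ n →
    pvMergeFrom cur rest = combine_consecutive_alt (cur :: rest) := by
  induction n with
  | zero =>
    intro rest cur hlen
    match rest with
    | [] => simp [pvMergeFrom, combine_consecutive_alt, pvRunSplit]
  | succ n ih =>
    intro rest cur hlen
    match rest with
    | [] => simp [pvMergeFrom, combine_consecutive_alt, pvRunSplit]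
    | m :: rest' =>
    have hlen' : rest'.length ≤ n := by simpa using hlen
    by_cases h : pvGetU m = pvGetU cur
    · rw [pvMergeFrom, if_pos h]
      rw [ih rest' _ hlen']
      rw [combine_consecutive_alt, combine_consecutive_alt]
      rcases hr : pvRunSplit (pvGetU cur) rest' with ⟨run', rest''⟩
      simp only [pvGetU_setT, hr]
      conv_rhs => rw [pvRunSplit, if_pos h, hr]
      cases run' with
      | nil =>
        simp [List.map, pvJoin_cons_cons, pvJoin_singleton]
      | cons x xs =>
        simp only [List.isEmpty_cons, Bool.false_eq_true, if_false, List.map, pvGetT_setT]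
        rw [pvSetT_setT]
        congr 2
        rw [pvJoin_cons_cons (pvGetT cur) (pvGetT m) (pvGetT x :: List.map pvGetT xs),
            pvJoin_cons_cons (pvGetT cur ++ " " ++ pvGetT m) (pvGetT x) (List.map pvGetT xs),
            pvJoin_cons_cons (pvGetT m) (pvGetT x) (List.map pvGetT xs)]
        simp [String.append_assoc]
    · rw [pvMergeFrom, if_neg h]
      rw [ih rest' m hlen']
      conv_rhs => rw [combine_consecutive_alt]
      simp [pvRunSplit, h]

theorem pvMergeFrom_eq_alt (rest : List (List (String × String))) (cur : List (String × String)) :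
    pvMergeFrom cur rest = combine_consecutive_alt (cur :: rest) :=
  pvMergeFrom_eq_alt_aux rest.length rest cur le_rfl

-- ===== VERDICT (by name: the statement is the Claim_ definition above) =====
theorem combine_consecutive_spec : Claim_equal_combine_consecutive := by
  unfold Claim_equal_combine_consecutive
  intro messages _ _
  unfold Spec_combine_consecutive
  match messages with
  | [] => simp [combine_consecutive, combine_consecutive_alt]
  | m0 :: rest =>
    rw [combine_consecutive]
    have := pvFoldl_eq_mergeFrom rest [] m0
    simp only [List.nil_append] at this
    rw [this, pvMergeFrom_eq_alt]
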